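-- pv_equiv track=rewrite | github.com/meikomeik/rumberman | therightway.py | get_fires
-- ===== SOURCE A (Python) =====
-- MAX_X = 9
--
-- MAX_Y = 9
--
-- def get_fires(bombs, fires, field):
--
--     matrix = [[[
--         '-' for x in range(MAX_X)] for y in range(MAX_Y)] for z in range(5)]
--     for life in range(5):
--         if life == 0:
--             for id, fire in fires.items():
--                 matrix[life][fire['x']][fire['y']] = 'X'
--         else:
--             for id, bomb in bombs.items():
--                 if bomb['life'] != life:
--                     continue
--                 x = bomb['x']
--                 y = bomb['y']
--                 minx = True
--                 miny = True
--                 maxx = True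
--                 maxy = True
--                 for i in range(bomb['blast_strength']):
--                     if 0 <= x + i < MAX_X and maxx:
--                         if field[x + i][y] in [1, 2]:
--                             maxx = False
--                         if field[x + i][y] in [0, 2]:
--                             matrix[life][x + i][y] = 'X'
--                     if 0 <= x - i < MAX_X and minx:
--                         if field[x - i][y] in [1, 2]:
--                             minx = False
--                         if field[x - i][y] in [0, 2]:
--                             matrix[life][x - i][y] = 'X'
--                     if 0 <= y + i < MAX_Y and maxy:
--                         if field[x][y + i] in [1, 2]:
--                             maxy = False
--                         if field[x][y + i] in [0, 2]:
--                             matrix[life][x][y + i] = 'X'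
--                     if 0 <= y - i < MAX_Y and miny:
--                         if field[x][y - i] in [1, 2]:
--                             miny = False
--                         if field[x][y - i] in [0, 2]:
--                             matrix[life][x][y - i] = 'X'
--     return matrix
-- ===== SOURCE B (Python) =====
-- MAX_X = 9
--
-- MAX_Y = 9
--
-- def get_fires(bombs, fires, field):
--     # Single pass: fires onto plane 0, then each bomb once onto plane bomb['life'],
--     # with a generic direction-vector blast walk instead of four flag-guarded copies.
--     matrix = [[[
--         '-' for x in range(MAX_X)] for y in range(MAX_Y)] for z in range(5)]
--     for id, fire in fires.items():
--         matrix[0][fire['x']][fire['y']] = 'X'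
--     for id, bomb in bombs.items():
--         life = bomb['life']
--         if not 1 <= life < 5:
--             continue
--         x, y = bomb['x'], bomb['y']
--         for dx, dy in ((1, 0), (-1, 0), (0, 1), (0, -1)):
--             for i in range(bomb['blast_strength']):
--                 nx, ny = x + dx * i, y + dy * i
--                 if dx != 0:
--                     if not 0 <= nx < MAX_X:
--                         continue
--                 else:
--                     if not 0 <= ny < MAX_Y:
--                         continue
--                 cell = field[nx][ny]
--                 if cell in (0, 2):
--                     matrix[life][nx][ny] = 'X'
--                 if cell in (1, 2):
--                     break
--     return matrix
-- ===== Notes on version B (the rewrite author's own statement) =====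
-- stated objective: simpler
-- what changed: B drops A's outer 'for life in range(5)' loop (which rescans all bombs once per life value) and instead makes one pass: fires straight onto plane 0, then each bomb exactly once onto plane bomb['life'] guarded by 1 <= life < 5, with the four copied flag-guarded blast blocks replaced by a single direction-vector walk that breaks at a blocking cell.
import Mathlib
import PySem

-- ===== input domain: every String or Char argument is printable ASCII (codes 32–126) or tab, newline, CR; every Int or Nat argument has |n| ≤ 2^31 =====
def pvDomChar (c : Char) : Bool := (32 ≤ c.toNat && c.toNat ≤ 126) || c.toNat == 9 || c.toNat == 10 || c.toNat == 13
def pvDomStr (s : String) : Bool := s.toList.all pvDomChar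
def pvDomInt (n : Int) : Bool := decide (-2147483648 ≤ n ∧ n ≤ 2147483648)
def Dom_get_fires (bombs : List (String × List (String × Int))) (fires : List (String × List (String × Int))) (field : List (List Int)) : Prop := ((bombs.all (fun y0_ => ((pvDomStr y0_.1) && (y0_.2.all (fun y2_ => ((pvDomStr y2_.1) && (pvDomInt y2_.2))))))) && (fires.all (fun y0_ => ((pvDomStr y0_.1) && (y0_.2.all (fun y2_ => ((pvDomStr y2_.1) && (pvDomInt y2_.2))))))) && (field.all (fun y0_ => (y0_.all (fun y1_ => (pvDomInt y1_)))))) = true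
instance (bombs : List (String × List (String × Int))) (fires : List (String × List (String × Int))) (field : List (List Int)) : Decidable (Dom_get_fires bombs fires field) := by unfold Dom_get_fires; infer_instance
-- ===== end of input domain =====

-- B folds fires and bombs once each (no outer life loop, no four copied blocks, no stop
-- flags: a direction-vector walk with break); same return value wherever A returns.

-- ===== PORT A =====
-- shared primitives (used by both ports, exact where Python does not raise):

-- bomb['x'] / fire['life'] …: Python raises KeyError where the key is absent (outside Pre_)
def dget (d : List (String × Int)) (k : String) : Int :=
  ((PySem.Dict.mk d).get? k).getD 0

-- field[i][j]: Python raises IndexError where this defaults (outside Pre_)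
def fieldAt (field : List (List Int)) (i j : Int) : Int :=
  ((PySem.List.pyGet? field i).bind (fun r => PySem.List.pyGet? r j)).getD (-3)

-- l[i] = f(l[i]) with Python index semantics; Python raises IndexError where this is id (outside Pre_)
def pyUpd {α : Type} (l : List α) (i : Int) (f : α → α) : List α :=
  match PySem.List.pyGet? l i with
  | none => l
  | some a => PySem.List.pySetD l i (f a)

-- matrix[z][x][y] = 'X'
def mset3 (m : List (List (List String))) (z x y : Int) : List (List (List String)) :=
  pyUpd m z (fun plane => pyUpd plane x (fun row => pyUpd row y (fun _ => "X")))

-- [[['-' for x in range(MAX_X)] for y in range(MAX_Y)] for z in range(5)]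
def initMatrix : List (List (List String)) :=
  (PySem.List.pyRange 0 5 1).map (fun _ =>
    (PySem.List.pyRange 0 9 1).map (fun _ =>
      (PySem.List.pyRange 0 9 1).map (fun _ => "-")))

-- body of A's 'for i in range(bomb['blast_strength'])' loop; state (matrix, minx, miny, maxx, maxy)
def get_firesStep (field : List (List Int)) (life x y : Int)
    (st : List (List (List String)) × Bool × Bool × Bool × Bool) (i : Int) :
    List (List (List String)) × Bool × Bool × Bool × Bool :=
  let m := st.1
  let minx := st.2.1
  let miny := st.2.2.1
  let maxx := st.2.2.2.1
  let maxy := st.2.2.2.2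
  let p1 : List (List (List String)) × Bool :=
    if (0 ≤ x + i ∧ x + i < 9) ∧ maxx = true then
      ((if fieldAt field (x + i) y = 0 ∨ fieldAt field (x + i) y = 2 then mset3 m life (x + i) y else m),
       (if fieldAt field (x + i) y = 1 ∨ fieldAt field (x + i) y = 2 then false else maxx))
    else (m, maxx)
  let p2 : List (List (List String)) × Bool :=
    if (0 ≤ x - i ∧ x - i < 9) ∧ minx = true then
      ((if fieldAt field (x - i) y = 0 ∨ fieldAt field (x - i) y = 2 then mset3 p1.1 life (x - i) y else p1.1),
       (if fieldAt field (x - i) y = 1 ∨ fieldAt field (x - i) y = 2 then false else minx))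
    else (p1.1, minx)
  let p3 : List (List (List String)) × Bool :=
    if (0 ≤ y + i ∧ y + i < 9) ∧ maxy = true then
      ((if fieldAt field x (y + i) = 0 ∨ fieldAt field x (y + i) = 2 then mset3 p2.1 life x (y + i) else p2.1),
       (if fieldAt field x (y + i) = 1 ∨ fieldAt field x (y + i) = 2 then false else maxy))
    else (p2.1, maxy)
  let p4 : List (List (List String)) × Bool :=
    if (0 ≤ y - i ∧ y - i < 9) ∧ miny = true then
      ((if fieldAt field x (y - i) = 0 ∨ fieldAt field x (y - i) = 2 then mset3 p3.1 life x (y - i) else p3.1),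
       (if fieldAt field x (y - i) = 1 ∨ fieldAt field x (y - i) = 2 then false else miny))
    else (p3.1, miny)
  (p4.1, p2.2, p4.2, p1.2, p3.2)

-- body of A's 'for id, bomb in bombs.items()' loop (for one fixed life)
def get_firesBomb (field : List (List Int)) (life : Int)
    (matrix : List (List (List String))) (kv : String × List (String × Int)) :
    List (List (List String)) :=
  let bomb := kv.2
  if dget bomb "life" ≠ life then matrix
  else
    let x := dget bomb "x"
    let y := dget bomb "y"
    ((PySem.List.pyRange 0 (dget bomb "blast_strength") 1).foldl
      (get_firesStep field life x y) (matrix, true, true, true, true)).1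

def get_fires (bombs : List (String × List (String × Int))) (fires : List (String × List (String × Int))) (field : List (List Int)) : List (List (List String)) :=
  (PySem.List.pyRange 0 5 1).foldl (fun matrix life =>
    if life = 0 then
      fires.foldl (fun matrix kv => mset3 matrix life (dget kv.2 "x") (dget kv.2 "y")) matrix
    else
      bombs.foldl (get_firesBomb field life) matrix) initMatrix

-- ===== PORT B =====
-- 'for i in range(blast_strength)' along one direction (dx, dy), with break
def blastRun (field : List (List Int)) (life x y dx dy : Int) :
    Nat → Int → List (List (List String)) → List (List (List String))
  | 0, _, m => m
  | n + 1, i, m =>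
    let nx := x + dx * i
    let ny := y + dy * i
    if (if dx ≠ 0 then decide (0 ≤ nx ∧ nx < 9) else decide (0 ≤ ny ∧ ny < 9)) then
      let c := fieldAt field nx ny
      let m' := if c = 0 ∨ c = 2 then mset3 m life nx ny else m
      if c = 1 ∨ c = 2 then m' else blastRun field life x y dx dy n (i + 1) m'
    else blastRun field life x y dx dy n (i + 1) m

-- body of B's 'for id, bomb in bombs.items()' loop
def get_fires_altBomb (field : List (List Int))
    (m : List (List (List String))) (kv : String × List (String × Int)) :
    List (List (List String)) :=
  let life := dget kv.2 "life"
  if 1 ≤ life ∧ life < 5 then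
    let x := dget kv.2 "x"
    let y := dget kv.2 "y"
    [((1 : Int), (0 : Int)), (-1, 0), (0, 1), (0, -1)].foldl
      (fun m d => blastRun field life x y d.1 d.2 (dget kv.2 "blast_strength").toNat 0 m) m
  else m

def get_fires_alt (bombs : List (String × List (String × Int))) (fires : List (String × List (String × Int))) (field : List (List Int)) : List (List (List String)) :=
  let m0 := fires.foldl (fun m kv => mset3 m 0 (dget kv.2 "x") (dget kv.2 "y")) initMatrix
  bombs.foldl (get_fires_altBomb field) m0

-- ===== PRECONDITION & SPEC =====
-- Pre_ excludes exactly the inputs it cannot certify non-raising in closed form, plus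
-- assoc lists with duplicate dict keys (a Python dict cannot hold them; lookup order is
-- representation-dependent).  It requires: distinct keys; every fire's 'x'/'y' present and
-- in [-9, 9) (A raises IndexError outside); every bomb's 'life' present; every live bomb's
-- 'x'/'y' present and on the 9×9 board with 'blast_strength' present; and, when some live
-- bomb has positive blast strength, a field covering the 9×9 board.  This is a stated
-- NARROWING: on a few inputs A still returns outside it (negative live-bomb coordinates
-- read/written through Python's negative-index wraparound, or an off-board/small-field
-- combination whose out-of-range cells are never reached) — B returns the identical value
-- on every such input; the exact non-raising condition depends on the walk itself and is
-- not closed-form.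
def coordOK (o : Option Int) (lo : Int) : Bool :=
  match o with
  | some v => decide (lo ≤ v ∧ v < 9)
  | none => false

def fireOK (d : List (String × Int)) : Bool :=
  decide (d.map Prod.fst).Nodup &&
    coordOK ((PySem.Dict.mk d).get? "x") (-9) && coordOK ((PySem.Dict.mk d).get? "y") (-9)

def bombOK (d : List (String × Int)) : Bool :=
  decide (d.map Prod.fst).Nodup && ((PySem.Dict.mk d).get? "life").isSome &&
    (let l := ((PySem.Dict.mk d).get? "life").getD 0
     if 1 ≤ l ∧ l < 5 then
       coordOK ((PySem.Dict.mk d).get? "x") 0 && coordOK ((PySem.Dict.mk d).get? "y") 0 &&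
         ((PySem.Dict.mk d).get? "blast_strength").isSome
     else true)

def liveBomb (kv : String × List (String × Int)) : Bool :=
  let l := ((PySem.Dict.mk kv.2).get? "life").getD 0
  decide (1 ≤ l ∧ l < 5) && decide (1 ≤ ((PySem.Dict.mk kv.2).get? "blast_strength").getD 0)

def Pre_get_fires (bombs : List (String × List (String × Int))) (fires : List (String × List (String × Int))) (field : List (List Int)) : Prop :=
  (fires.map Prod.fst).Nodup ∧ (bombs.map Prod.fst).Nodup ∧
  (∀ p ∈ fires, fireOK p.2 = true) ∧ (∀ p ∈ bombs, bombOK p.2 = true) ∧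
  (bombs.any liveBomb = true → 9 ≤ field.length ∧ ∀ r ∈ field.take 9, 9 ≤ r.length)

instance (bombs : List (String × List (String × Int))) (fires : List (String × List (String × Int))) (field : List (List Int)) : Decidable (Pre_get_fires bombs fires field) := by
  unfold Pre_get_fires; infer_instance

def pvWitness_get_fires : (List (String × List (String × Int))) × (List (String × List (String × Int))) × List (List Int) :=
  ([("b1", [("life", 1), ("x", 2), ("y", 2), ("blast_strength", 2)])],
   [("f1", [("x", 0), ("y", 0)])],
   List.replicate 9 (List.replicate 9 0))

def Spec_get_fires (bombs : List (String × List (String × Int))) (fires : List (String × List (String × Int))) (field : List (List Int)) (out : List (List (List String))) : Prop := out = get_fires_alt bombs fires field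
instance (bombs : List (String × List (String × Int))) (fires : List (String × List (String × Int))) (field : List (List Int)) (out : List (List (List String))) : Decidable (Spec_get_fires bombs fires field out) := by unfold Spec_get_fires; infer_instance

-- ===== CLAIM (what is proved, stated in full; the proofs are below) =====
def Claim_equal_get_fires : Prop := ∀ (bombs : List (String × List (String × Int))) (fires : List (String × List (String × Int))) (field : List (List Int)), Dom_get_fires bombs fires field → Pre_get_fires bombs fires field → Spec_get_fires bombs fires field (get_fires bombs fires field)

-- ===== LEMMAS AND PROOFS =====

-- every mutation either program performs is an 'X' write; reify runs as write lists
def apW (m : List (List (List String))) (ws : List (Int × Int × Int)) : List (List (List String)) :=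
  ws.foldl (fun m w => mset3 m w.1 w.2.1 w.2.2) m

-- the guard / write / kill atoms of one blast cell, direction (dx, dy), offset i
def atomG (x y dx dy i : Int) : Bool :=
  if dx ≠ 0 then decide (0 ≤ x + dx * i ∧ x + dx * i < 9) else decide (0 ≤ y + dy * i ∧ y + dy * i < 9)

def atomW (field : List (List Int)) (life x y dx dy i : Int) : List (Int × Int × Int) :=
  if fieldAt field (x + dx * i) (y + dy * i) = 0 ∨ fieldAt field (x + dx * i) (y + dy * i) = 2 then
    [(life, x + dx * i, y + dy * i)]
  else []

def atomK (field : List (List Int)) (x y dx dy i : Int) : Bool :=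
  decide (fieldAt field (x + dx * i) (y + dy * i) = 1 ∨ fieldAt field (x + dx * i) (y + dy * i) = 2)

def updF (field : List (List Int)) (x y dx dy i : Int) (a : Bool) : Bool :=
  if atomG x y dx dy i && a then (if atomK field x y dx dy i then false else a) else a

-- write list of one direction walked alone (B's shape)
def dirW (field : List (List Int)) (life x y dx dy : Int) : List Int → Bool → List (Int × Int × Int)
  | [], _ => []
  | i :: l, a =>
    (if atomG x y dx dy i && a then atomW field life x y dx dy i else []) ++
      dirW field life x y dx dy l (updF field x y dx dy i a)

-- write list of the four directions walked interleaved (A's shape); flags (fxp, fxm, fyp, fym)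
def interW (field : List (List Int)) (life x y : Int) : List Int → Bool → Bool → Bool → Bool → List (Int × Int × Int)
  | [], _, _, _, _ => []
  | i :: l, fxp, fxm, fyp, fym =>
    (if atomG x y 1 0 i && fxp then atomW field life x y 1 0 i else []) ++
    ((if atomG x y (-1) 0 i && fxm then atomW field life x y (-1) 0 i else []) ++
    ((if atomG x y 0 1 i && fyp then atomW field life x y 0 1 i else []) ++
    ((if atomG x y 0 (-1) i && fym then atomW field life x y 0 (-1) i else []) ++
    interW field life x y l (updF field x y 1 0 i fxp) (updF field x y (-1) 0 i fxm)
      (updF field x y 0 1 i fyp) (updF field x y 0 (-1) i fym))))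

def idxs : Nat → Int → List Int
  | 0, _ => []
  | n + 1, i => i :: idxs n (i + 1)

-- per-bomb write lists, A's interleaved and B's direction-sequential
def selA (field : List (List Int)) (l : Int) (kv : String × List (String × Int)) : List (Int × Int × Int) :=
  if dget kv.2 "life" = l then
    interW field l (dget kv.2 "x") (dget kv.2 "y")
      (idxs (dget kv.2 "blast_strength").toNat 0) true true true true
  else []

def selA' (field : List (List Int)) (l : Int) (kv : String × List (String × Int)) : List (Int × Int × Int) :=
  if dget kv.2 "life" = l then
    dirW field l (dget kv.2 "x") (dget kv.2 "y") 1 0 (idxs (dget kv.2 "blast_strength").toNat 0) true ++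
    dirW field l (dget kv.2 "x") (dget kv.2 "y") (-1) 0 (idxs (dget kv.2 "blast_strength").toNat 0) true ++
    dirW field l (dget kv.2 "x") (dget kv.2 "y") 0 1 (idxs (dget kv.2 "blast_strength").toNat 0) true ++
    dirW field l (dget kv.2 "x") (dget kv.2 "y") 0 (-1) (idxs (dget kv.2 "blast_strength").toNat 0) true
  else []

def selB (field : List (List Int)) (kv : String × List (String × Int)) : List (Int × Int × Int) :=
  let l := dget kv.2 "life"
  if 1 ≤ l ∧ l < 5 then
    dirW field l (dget kv.2 "x") (dget kv.2 "y") 1 0 (idxs (dget kv.2 "blast_strength").toNat 0) true ++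
    dirW field l (dget kv.2 "x") (dget kv.2 "y") (-1) 0 (idxs (dget kv.2 "blast_strength").toNat 0) true ++
    dirW field l (dget kv.2 "x") (dget kv.2 "y") 0 1 (idxs (dget kv.2 "blast_strength").toNat 0) true ++
    dirW field l (dget kv.2 "x") (dget kv.2 "y") 0 (-1) (idxs (dget kv.2 "blast_strength").toNat 0) true
  else []

-- ---- commuting writes ----
lemma pyUpd_length {α : Type} (l : List α) (i : Int) (f : α → α) : (pyUpd l i f).length = l.length := by
  unfold pyUpd
  cases h : PySem.List.pyGet? l i with
  | none => rfl
  | some a =>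
    simp [PySem.List.pySetD, PySem.List.pySet?]
    cases hk : PySem.List.pyIdx? l.length i <;> simp

lemma pyIdx?_lt (n : Nat) (i : Int) (k : Nat) (h : PySem.List.pyIdx? n i = some k) : k < n := by
  unfold PySem.List.pyIdx? at h
  split_ifs at h <;> simp_all <;> omega

lemma pyUpd_eq_modify {α : Type} (l : List α) (i : Int) (f : α → α) :
    pyUpd l i f = match PySem.List.pyIdx? l.length i with
      | none => l
      | some k => l.modify k f := by
  unfold pyUpd PySem.List.pyGet?
  cases h : PySem.List.pyIdx? l.length i with
  | none => simp
  | some k =>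
    have hk := pyIdx?_lt _ _ _ h
    simp only [Option.bind, List.getElem?_eq_getElem hk, PySem.List.pySetD, PySem.List.pySet?, h,
      Option.map_some, Option.getD_some]
    exact (List.modify_eq_set_get f hk).symm

lemma modify_comm {α : Type} (l : List α) (k1 k2 : Nat) (f g : α → α)
    (h : ∀ a, f (g a) = g (f a)) :
    (l.modify k1 f).modify k2 g = (l.modify k2 g).modify k1 f := by
  apply List.ext_getElem?
  intro j
  simp only [List.getElem?_modify]
  cases l[j]? with
  | none => by_cases h1 : k1 = j <;> by_cases h2 : k2 = j <;> simp [h1, h2]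
  | some a => by_cases h1 : k1 = j <;> by_cases h2 : k2 = j <;> simp [h1, h2, h]

lemma pyUpd_comm {α : Type} (l : List α) (i j : Int) (f g : α → α)
    (h : ∀ a, f (g a) = g (f a)) :
    pyUpd (pyUpd l i f) j g = pyUpd (pyUpd l j g) i f := by
  rw [pyUpd_eq_modify (pyUpd l i f) j g, pyUpd_eq_modify (pyUpd l j g) i f,
    pyUpd_length, pyUpd_length, pyUpd_eq_modify l i f, pyUpd_eq_modify l j g]
  cases h1 : PySem.List.pyIdx? l.length i with
  | none =>
    cases h2 : PySem.List.pyIdx? l.length j with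
    | none => simp
    | some k2 => simp [List.length_modify, h1]
  | some k1 =>
    cases h2 : PySem.List.pyIdx? l.length j with
    | none => simp [List.length_modify, h2]
    | some k2 =>
      simp only [List.length_modify, h1, h2]
      exact modify_comm l k1 k2 f g h

lemma mset3_comm (m : List (List (List String))) (z1 x1 y1 z2 x2 y2 : Int) :
    mset3 (mset3 m z1 x1 y1) z2 x2 y2 = mset3 (mset3 m z2 x2 y2) z1 x1 y1 := by
  unfold mset3
  apply pyUpd_comm
  intro plane
  apply pyUpd_comm
  intro row
  apply pyUpd_comm
  intro a
  rfl

lemma apW_perm (m : List (List (List String))) {ws1 ws2 : List (Int × Int × Int)} (h : ws1.Perm ws2) :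
    apW m ws1 = apW m ws2 := by
  letI : RightCommutative (fun (m : List (List (List String))) (w : Int × Int × Int) => mset3 m w.1 w.2.1 w.2.2) :=
    ⟨fun m a b => mset3_comm m a.1 a.2.1 a.2.2 b.1 b.2.1 b.2.2⟩
  exact h.foldl_eq m

lemma apW_append (m : List (List (List String))) (ws1 ws2 : List (Int × Int × Int)) :
    apW m (ws1 ++ ws2) = apW (apW m ws1) ws2 :=
  List.foldl_append

lemma perm8 {α : Type} (a1 a2 a3 a4 b1 b2 b3 b4 : List α) :
    (a1 ++ (a2 ++ (a3 ++ (a4 ++ (b1 ++ (b2 ++ (b3 ++ b4))))))).Perm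
      ((a1 ++ b1) ++ ((a2 ++ b2) ++ ((a3 ++ b3) ++ (a4 ++ b4)))) := by
  rw [← Multiset.coe_eq_coe]
  simp only [← Multiset.coe_add]
  abel

-- ---- A reified ----
lemma block_eq (field : List (List Int)) (life nx ny : Int) (gP : Prop) [Decidable gP] (gB : Bool)
    (hg : gB = true ↔ gP) (m : List (List (List String))) (flag : Bool) :
    (if gP ∧ flag = true then
      ((if fieldAt field nx ny = 0 ∨ fieldAt field nx ny = 2 then mset3 m life nx ny else m),
       (if fieldAt field nx ny = 1 ∨ fieldAt field nx ny = 2 then false else flag))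
     else (m, flag)) =
    (apW m (if gB && flag then
        (if fieldAt field nx ny = 0 ∨ fieldAt field nx ny = 2 then [(life, nx, ny)] else []) else []),
     (if gB && flag then (if fieldAt field nx ny = 1 ∨ fieldAt field nx ny = 2 then false else flag)
      else flag)) := by
  by_cases hP : gP
  · have hB : gB = true := hg.mpr hP
    cases flag <;> simp [hB, hP, apW] <;> split_ifs <;> simp [apW]
  · have hB : gB = false := by
      cases hB2 : gB
      · rfl
      · exact absurd (hg.mp hB2) hP
    cases flag <;> simp [hB, hP, apW]

lemma stepA_eq (field : List (List Int)) (life x y : Int)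
    (m : List (List (List String))) (fxm fym fxp fyp : Bool) (i : Int) :
    get_firesStep field life x y (m, fxm, fym, fxp, fyp) i =
      (apW m ((if atomG x y 1 0 i && fxp then atomW field life x y 1 0 i else []) ++
        ((if atomG x y (-1) 0 i && fxm then atomW field life x y (-1) 0 i else []) ++
        ((if atomG x y 0 1 i && fyp then atomW field life x y 0 1 i else []) ++
        (if atomG x y 0 (-1) i && fym then atomW field life x y 0 (-1) i else [])))),
       updF field x y (-1) 0 i fxm, updF field x y 0 (-1) i fym,
       updF field x y 1 0 i fxp, updF field x y 0 1 i fyp) := by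
  have e1 : x + 1 * i = x + i := by ring
  have e2 : x + (-1) * i = x - i := by ring
  have e3 : y + 0 * i = y := by ring
  have e4 : y + 1 * i = y + i := by ring
  have e5 : y + (-1) * i = y - i := by ring
  have e6 : x + 0 * i = x := by ring
  have hg1 : atomG x y 1 0 i = true ↔ (0 ≤ x + i ∧ x + i < 9) := by
    unfold atomG; norm_num [e1]
  have hg2 : atomG x y (-1) 0 i = true ↔ (0 ≤ x - i ∧ x - i < 9) := by
    unfold atomG; norm_num [e2]; omega
  have hg3 : atomG x y 0 1 i = true ↔ (0 ≤ y + i ∧ y + i < 9) := by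
    unfold atomG; norm_num [e4]
  have hg4 : atomG x y 0 (-1) i = true ↔ (0 ≤ y - i ∧ y - i < 9) := by
    unfold atomG; norm_num [e5]; omega
  simp only [get_firesStep]
  rw [block_eq field life (x + i) y _ _ hg1 m fxp]
  rw [block_eq field life (x - i) y _ _ hg2 _ fxm]
  rw [block_eq field life x (y + i) _ _ hg3 _ fyp]
  rw [block_eq field life x (y - i) _ _ hg4 _ fym]
  simp only [atomW, updF, atomK, e1, e2, e3, e4, e5, e6, decide_eq_true_eq, apW_append]

lemma foldA_eq (field : List (List Int)) (life x y : Int) :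
    ∀ (l : List Int) (m : List (List (List String))) (fxm fym fxp fyp : Bool),
      (l.foldl (get_firesStep field life x y) (m, fxm, fym, fxp, fyp)).1 =
        apW m (interW field life x y l fxp fxm fyp fym) := by
  intro l
  induction l with
  | nil => intro m fxm fym fxp fyp; rfl
  | cons i t ih =>
    intro m fxm fym fxp fyp
    rw [List.foldl_cons, stepA_eq, ih]
    rw [interW]
    simp only [apW_append]

lemma pyRange_idxs_gen : ∀ (n : Nat) (a : Int), PySem.List.pyRange a (a + n) 1 = idxs n a := by
  intro n
  induction n with
  | zero => intro a; simp [PySem.List.pyRange_one_eq_nil, idxs]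
  | succ k ih =>
    intro a
    rw [PySem.List.pyRange_one_cons (by omega)]
    have : a + (k + 1 : Nat) = (a + 1) + (k : Nat) := by push_cast; ring
    rw [this, ih]
    rfl

lemma pyRange_idxs (s : Int) : PySem.List.pyRange 0 s 1 = idxs s.toNat 0 := by
  rcases le_or_gt 0 s with h | h
  · have h1 : s = (0 : Int) + (s.toNat : Int) := by omega
    have h2 : ((0 : Int) + (s.toNat : Int)).toNat = s.toNat := by omega
    rw [h1, pyRange_idxs_gen, h2]
  · rw [PySem.List.pyRange_one_eq_nil (by omega)]
    have : s.toNat = 0 := by omega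
    rw [this]
    rfl

lemma bombA_eq (field : List (List Int)) (l : Int) (m : List (List (List String)))
    (kv : String × List (String × Int)) :
    get_firesBomb field l m kv = apW m (selA field l kv) := by
  unfold get_firesBomb selA
  by_cases h : dget kv.2 "life" = l
  · simp only [h, ne_eq, not_true_eq_false, if_false, if_true, ite_true, ite_false]
    rw [pyRange_idxs, foldA_eq]
  · simp [h, apW]

lemma lifeFoldA_eq (field : List (List Int)) (l : Int) :
    ∀ (bombs : List (String × List (String × Int))) (m : List (List (List String))),
      bombs.foldl (get_firesBomb field l) m = apW m (bombs.flatMap (selA field l)) := by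
  intro bombs
  induction bombs with
  | nil => intro m; rfl
  | cons kv t ih =>
    intro m
    rw [List.foldl_cons, ih, List.flatMap_cons, apW_append, bombA_eq]

-- ---- B reified ----
lemma dirW_false (field : List (List Int)) (life x y dx dy : Int) :
    ∀ l : List Int, dirW field life x y dx dy l false = [] := by
  intro l
  induction l with
  | nil => rfl
  | cons i t ih => rw [dirW]; simp [updF, ih]

lemma blastRun_eq (field : List (List Int)) (life x y dx dy : Int) :
    ∀ (n : Nat) (i : Int) (m : List (List (List String))),
      blastRun field life x y dx dy n i m = apW m (dirW field life x y dx dy (idxs n i) true) := by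
  intro n
  induction n with
  | zero => intro i m; rfl
  | succ k ih =>
    intro i m
    rw [blastRun, idxs, dirW]
    by_cases hg : atomG x y dx dy i = true
    · have hg' : (if dx ≠ 0 then decide (0 ≤ x + dx * i ∧ x + dx * i < 9)
          else decide (0 ≤ y + dy * i ∧ y + dy * i < 9)) = true := hg
      simp only [hg', if_true, hg, Bool.true_and, and_true, if_pos rfl]
      by_cases hk : atomK field x y dx dy i = true
      · have hk' : fieldAt field (x + dx * i) (y + dy * i) = 1 ∨ fieldAt field (x + dx * i) (y + dy * i) = 2 := by
          simpa [atomK] using hk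
        simp only [if_pos hk', updF, hg, Bool.true_and, and_true, if_pos rfl, hk, if_true,
          dirW_false, List.append_nil]
        unfold atomW
        by_cases hw : fieldAt field (x + dx * i) (y + dy * i) = 0 ∨ fieldAt field (x + dx * i) (y + dy * i) = 2
        · simp [hw, apW, mset3]
        · simp [hw, apW]
      · have hk' : ¬(fieldAt field (x + dx * i) (y + dy * i) = 1 ∨ fieldAt field (x + dx * i) (y + dy * i) = 2) := by
          simpa [atomK] using hk
        simp only [if_neg hk', updF, hg, Bool.true_and, and_true, if_pos rfl, hk, if_false]
        rw [ih, apW_append]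
        congr 1
        unfold atomW apW
        by_cases hw : fieldAt field (x + dx * i) (y + dy * i) = 0 ∨ fieldAt field (x + dx * i) (y + dy * i) = 2
        · simp [hw, mset3]
        · simp [hw]
    · have hg0 : atomG x y dx dy i = false := by simpa using hg
      have hg' : (if dx ≠ 0 then decide (0 ≤ x + dx * i ∧ x + dx * i < 9)
          else decide (0 ≤ y + dy * i ∧ y + dy * i < 9)) = false := hg0
      rw [hg']
      simp only [Bool.false_eq_true, if_false, hg0, Bool.false_and, List.nil_append]
      rw [ih]
      simp [updF, hg0]

lemma bombB_eq (field : List (List Int)) (m : List (List (List String)))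
    (kv : String × List (String × Int)) :
    get_fires_altBomb field m kv = apW m (selB field kv) := by
  unfold get_fires_altBomb selB
  by_cases h : 1 ≤ dget kv.2 "life" ∧ dget kv.2 "life" < 5
  · simp only [h, if_pos, List.foldl_cons, List.foldl_nil]
    rw [blastRun_eq, blastRun_eq, blastRun_eq, blastRun_eq]
    simp [apW_append]
  · simp [h, apW]

lemma bFold_eq (field : List (List Int)) :
    ∀ (bombs : List (String × List (String × Int))) (m : List (List (List String))),
      bombs.foldl (get_fires_altBomb field) m = apW m (bombs.flatMap (selB field)) := by
  intro bombs
  induction bombs with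
  | nil => intro m; rfl
  | cons kv t ih =>
    intro m
    rw [List.foldl_cons, ih, List.flatMap_cons, apW_append, bombB_eq]

-- ---- permutation of the two write lists ----
lemma interW_perm (field : List (List Int)) (life x y : Int) :
    ∀ (l : List Int) (fxp fxm fyp fym : Bool),
      (interW field life x y l fxp fxm fyp fym).Perm
        (dirW field life x y 1 0 l fxp ++ dirW field life x y (-1) 0 l fxm ++
         dirW field life x y 0 1 l fyp ++ dirW field life x y 0 (-1) l fym) := by
  intro l
  induction l with
  | nil => intro fxp fxm fyp fym; simp [interW, dirW]
  | cons i t ih =>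
    intro fxp fxm fyp fym
    rw [interW, dirW, dirW, dirW, dirW]
    simp only [List.append_assoc]
    refine ((((ih _ _ _ _).append_left _).append_left _).append_left _).append_left _ |>.trans ?_
    simpa only [List.append_assoc] using
      perm8 (if atomG x y 1 0 i && fxp then atomW field life x y 1 0 i else [])
        (if atomG x y (-1) 0 i && fxm then atomW field life x y (-1) 0 i else [])
        (if atomG x y 0 1 i && fyp then atomW field life x y 0 1 i else [])
        (if atomG x y 0 (-1) i && fym then atomW field life x y 0 (-1) i else [])
        (dirW field life x y 1 0 t (updF field x y 1 0 i fxp))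
        (dirW field life x y (-1) 0 t (updF field x y (-1) 0 i fxm))
        (dirW field life x y 0 1 t (updF field x y 0 1 i fyp))
        (dirW field life x y 0 (-1) t (updF field x y 0 (-1) i fym))

lemma selA_perm (field : List (List Int)) (l : Int) (kv : String × List (String × Int)) :
    (selA field l kv).Perm (selA' field l kv) := by
  unfold selA selA'
  by_cases h : dget kv.2 "life" = l
  · simp only [h, if_pos rfl]
    simpa only [List.append_assoc] using interW_perm field l (dget kv.2 "x") (dget kv.2 "y")
      (idxs (dget kv.2 "blast_strength").toNat 0) true true true true
  · simp [h]

lemma flatMap_perm {α β : Type} (l : List α) (f g : α → List β)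
    (h : ∀ x ∈ l, (f x).Perm (g x)) : (l.flatMap f).Perm (l.flatMap g) := by
  induction l with
  | nil => simp
  | cons a t ih =>
    simp only [List.flatMap_cons]
    exact (h a (by simp)).append (ih (fun x hx => h x (by simp [hx])))

lemma selB_eq (field : List (List Int)) (kv : String × List (String × Int)) :
    selB field kv = selA' field 1 kv ++ (selA' field 2 kv ++ (selA' field 3 kv ++ selA' field 4 kv)) := by
  unfold selB selA'
  by_cases h1 : dget kv.2 "life" = 1
  · simp [h1]
  · by_cases h2 : dget kv.2 "life" = 2
    · simp [h2]
    · by_cases h3 : dget kv.2 "life" = 3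
      · simp [h3]
      · by_cases h4 : dget kv.2 "life" = 4
        · simp [h4]
        · have : ¬(1 ≤ dget kv.2 "life" ∧ dget kv.2 "life" < 5) := by omega
          simp [h1, h2, h3, h4, this]

lemma group_perm {α β : Type} (sel : Int → α → List β) :
    ∀ (l : List α),
      (l.flatMap (fun kv => sel 1 kv ++ (sel 2 kv ++ (sel 3 kv ++ sel 4 kv)))).Perm
        (l.flatMap (sel 1) ++ l.flatMap (sel 2) ++ l.flatMap (sel 3) ++ l.flatMap (sel 4)) := by
  intro l
  induction l with
  | nil => simp
  | cons a t ih =>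
    simp only [List.flatMap_cons, List.append_assoc]
    refine ((((ih.append_left (sel 4 a)).append_left (sel 3 a)).append_left (sel 2 a)).append_left (sel 1 a)).trans ?_
    simpa only [List.append_assoc] using
      perm8 (sel 1 a) (sel 2 a) (sel 3 a) (sel 4 a)
        (t.flatMap (sel 1)) (t.flatMap (sel 2)) (t.flatMap (sel 3)) (t.flatMap (sel 4))

lemma main_eq (bombs fires : List (String × List (String × Int))) (field : List (List Int)) :
    get_fires bombs fires field = get_fires_alt bombs fires field := by
  have hr : PySem.List.pyRange 0 5 1 = [0, 1, 2, 3, 4] := by decide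
  unfold get_fires get_fires_alt
  rw [hr]
  simp only [List.foldl_cons, List.foldl_nil]
  norm_num
  rw [lifeFoldA_eq, lifeFoldA_eq, lifeFoldA_eq, lifeFoldA_eq, bFold_eq]
  set m0 := fires.foldl (fun m kv => mset3 m 0 (dget kv.2 "x") (dget kv.2 "y")) initMatrix with hm0
  rw [← apW_append, ← apW_append, ← apW_append, ← List.append_assoc, ← List.append_assoc]
  apply apW_perm
  have p1 : (bombs.flatMap (selA field 1) ++ bombs.flatMap (selA field 2) ++
      bombs.flatMap (selA field 3) ++ bombs.flatMap (selA field 4)).Perm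
      (bombs.flatMap (selA' field 1) ++ bombs.flatMap (selA' field 2) ++
      bombs.flatMap (selA' field 3) ++ bombs.flatMap (selA' field 4)) :=
    (((flatMap_perm _ _ _ (fun kv _ => selA_perm field 1 kv)).append
      (flatMap_perm _ _ _ (fun kv _ => selA_perm field 2 kv))).append
      (flatMap_perm _ _ _ (fun kv _ => selA_perm field 3 kv))).append
      (flatMap_perm _ _ _ (fun kv _ => selA_perm field 4 kv))
  refine p1.trans ?_
  have hfun : selB field = fun kv => selA' field 1 kv ++ (selA' field 2 kv ++ (selA' field 3 kv ++ selA' field 4 kv)) :=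
    funext (selB_eq field)
  rw [hfun]
  exact (group_perm (fun l kv => selA' field l kv) bombs).symm

-- ===== VERDICT (by name: the statement is the Claim_ definition above) =====
theorem get_fires_spec : Claim_equal_get_fires := by
  intro bombs fires field _ _
  unfold Spec_get_fires
  exact main_eq bombs fires field
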